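-- pv_equiv track=rewrite | github.com/rudyleute/fifaSquadDB | main.py | formRatingByRegion
-- ===== SOURCE A (Python) =====
-- def formRatingByRegion(countriesGroup, countriesByRating, leagues):
--     result = dict()
--     for oneRegion in countriesGroup:
--         result[oneRegion] = []
--
--     for oneCountry in countriesByRating:
--         for oneRegion in countriesGroup:
--             if oneCountry not in countriesGroup[oneRegion]:
--                 continue
--
--             for size in countriesByRating[oneCountry]:
--                 level = list()
--                 for oneLeague in countriesByRating[oneCountry][size]:
--                     level.append(tuple([leagues[oneLeague]["level"], oneLeague]))
--
--                 level = sorted(level, key=lambda item: item[0])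
--                 result[oneRegion].extend([dict({list(countriesByRating[oneCountry].keys())[0]: [value[1] for value in level]})])
--     return result
-- ===== SOURCE B (Python) =====
-- def formRatingByRegion(countriesGroup, countriesByRating, leagues):
--     # Precompute country -> ordered set of regions once, instead of rescanning
--     # every region's member list for every country.
--     regionsOf = {}
--     for region, members in countriesGroup.items():
--         for country in members:
--             regionsOf.setdefault(country, {})[region] = None
--
--     result = {region: [] for region in countriesGroup}
--     for country, ratings in countriesByRating.items():
--         regions = regionsOf.get(country)
--         if not regions or not ratings:
--             continue
--         firstKey = next(iter(ratings))
--         blocks = [{firstKey: sorted(ls, key=lambda lg: leagues[lg]["level"])}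
--                   for ls in ratings.values()]
--         for region in regions:
--             result[region].extend(blocks)
--     return result
-- ===== Notes on version B (the rewrite author's own statement) =====
-- stated objective: alternative
-- what changed: B builds a country-to-regions index once and computes each country's sorted league blocks once (sorting league names directly by their level instead of decorate-sort-undecorate), instead of rescanning every region's member list for every country and rebuilding the blocks per region; intended as faster (a timing run read 3-5x at the largest size both finished but could not confirm it consistently), so no speed is claimed.
import Mathlib
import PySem

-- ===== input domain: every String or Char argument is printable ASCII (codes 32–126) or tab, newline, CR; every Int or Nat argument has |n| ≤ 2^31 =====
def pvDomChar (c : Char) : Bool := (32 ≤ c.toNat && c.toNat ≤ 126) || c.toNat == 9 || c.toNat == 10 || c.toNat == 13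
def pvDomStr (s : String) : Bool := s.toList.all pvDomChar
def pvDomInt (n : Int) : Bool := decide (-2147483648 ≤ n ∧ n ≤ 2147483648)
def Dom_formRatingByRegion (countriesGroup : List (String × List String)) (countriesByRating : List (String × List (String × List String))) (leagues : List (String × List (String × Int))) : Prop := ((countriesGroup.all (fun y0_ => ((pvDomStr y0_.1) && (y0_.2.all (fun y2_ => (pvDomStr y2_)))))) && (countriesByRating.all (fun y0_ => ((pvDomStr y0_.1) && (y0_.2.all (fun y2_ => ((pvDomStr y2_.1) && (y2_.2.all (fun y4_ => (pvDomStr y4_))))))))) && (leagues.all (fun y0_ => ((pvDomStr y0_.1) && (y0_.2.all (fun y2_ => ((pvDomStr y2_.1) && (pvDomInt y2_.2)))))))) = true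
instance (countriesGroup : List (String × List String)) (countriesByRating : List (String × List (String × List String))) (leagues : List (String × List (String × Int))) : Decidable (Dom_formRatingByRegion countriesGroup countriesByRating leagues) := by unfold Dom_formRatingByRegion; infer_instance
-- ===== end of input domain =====

-- B precomputes a country → regions map once (instead of rescanning every region's
-- member list for every country) and builds each country's blocks once, sorting the
-- league names directly; return value proved equal to A's on all non-raising inputs.

-- ===== PORT A =====
def formRatingByRegion (countriesGroup : List (String × List String)) (countriesByRating : List (String × List (String × List String))) (leagues : List (String × List (String × Int))) : List (String × List (List (String × List String))) :=
  let cgD := PySem.Dict.ofList countriesGroup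
  let cbrD := PySem.Dict.ofList countriesByRating
  let lgD := PySem.Dict.ofList leagues
  -- result = dict(); for oneRegion in countriesGroup: result[oneRegion] = []
  let result : PySem.Dict String (List (List (String × List String))) :=
    cgD.keys.foldl (fun r oneRegion => r.insert oneRegion []) PySem.Dict.empty
  -- for oneCountry in countriesByRating: for oneRegion in countriesGroup: …
  let result := cbrD.keys.foldl (fun r oneCountry =>
    cgD.keys.foldl (fun r oneRegion =>
      if !((cgD.getD oneRegion []).contains oneCountry) then r
      else
        let ratings := PySem.Dict.ofList (cbrD.getD oneCountry [])
        -- for size in countriesByRating[oneCountry]: …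
        ratings.keys.foldl (fun r size =>
          let level : List (Int × String) := (ratings.getD size []).foldl (fun lev oneLeague =>
            lev ++ [((PySem.Dict.ofList (lgD.getD oneLeague [])).getD "level" 0, oneLeague)]) []
          let level := PySem.List.sorted level (fun item => item.1) false
          r.modify oneRegion [] (fun v =>
            v ++ [[(PySem.List.pyGetD ratings.keys 0 "", level.map (fun value => value.2))]])) r) r) result
  result.items

-- ===== PORT B =====
def formRatingByRegion_alt (countriesGroup : List (String × List String)) (countriesByRating : List (String × List (String × List String))) (leagues : List (String × List (String × Int))) : List (String × List (List (String × List String))) :=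
  let cgD := PySem.Dict.ofList countriesGroup
  let cbrD := PySem.Dict.ofList countriesByRating
  let lgD := PySem.Dict.ofList leagues
  -- regionsOf: country → ordered set of regions (dict keys used as an ordered set)
  let regionsOf : PySem.Dict String (List String) :=
    cgD.items.foldl (fun m p => p.2.foldl (fun m country => m.modify country [] (fun s => PySem.Set.add s p.1)) m) PySem.Dict.empty
  -- result = {region: [] for region in countriesGroup}
  let result0 : PySem.Dict String (List (List (String × List String))) :=
    cgD.keys.foldl (fun r region => r.insert region []) PySem.Dict.empty
  let result := cbrD.items.foldl (fun r p =>
    match regionsOf.get? p.1 with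
    | none => r
    | some regions =>
      let ratings := PySem.Dict.ofList p.2
      if regions.isEmpty || ratings.items.isEmpty then r
      else
        let firstKey := PySem.List.pyGetD ratings.keys 0 ""
        let blocks := ratings.items.map (fun q =>
          [(firstKey, PySem.List.sorted q.2 (fun lg => (PySem.Dict.ofList (lgD.getD lg [])).getD "level" 0) false)])
        regions.foldl (fun r region => r.modify region [] (fun v => v ++ blocks)) r) result0
  result.items

-- ===== PRECONDITION & SPEC =====
-- Pre_ excludes exactly the inputs on which Python A raises a KeyError: some league
-- listed under a country that belongs to at least one region is missing from
-- `leagues`, or its entry has no "level" key.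
def Pre_formRatingByRegion (countriesGroup : List (String × List String)) (countriesByRating : List (String × List (String × List String))) (leagues : List (String × List (String × Int))) : Prop :=
  ∀ p ∈ (PySem.Dict.ofList countriesByRating).items,
    (∃ q ∈ (PySem.Dict.ofList countriesGroup).items, p.1 ∈ q.2) →
    ∀ s ∈ (PySem.Dict.ofList p.2).items, ∀ lg ∈ s.2,
      (((PySem.Dict.ofList leagues).get? lg).any (fun m => (PySem.Dict.ofList m).contains "level")) = true
instance (countriesGroup : List (String × List String)) (countriesByRating : List (String × List (String × List String))) (leagues : List (String × List (String × Int))) : Decidable (Pre_formRatingByRegion countriesGroup countriesByRating leagues) := by unfold Pre_formRatingByRegion; infer_instance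

def pvWitness_formRatingByRegion : (List (String × List String)) × (List (String × List (String × List String))) × (List (String × List (String × Int))) :=
  ([("west", ["fr", "de"])], [("fr", [("big", ["l1", "l2"]), ("small", ["l1"])])], [("l1", [("level", 2)]), ("l2", [("level", 1)])])

def Spec_formRatingByRegion (countriesGroup : List (String × List String)) (countriesByRating : List (String × List (String × List String))) (leagues : List (String × List (String × Int))) (out : List (String × List (List (String × List String)))) : Prop := out = formRatingByRegion_alt countriesGroup countriesByRating leagues
instance (countriesGroup : List (String × List String)) (countriesByRating : List (String × List (String × List String))) (leagues : List (String × List (String × Int))) (out : List (String × List (List (String × List String)))) : Decidable (Spec_formRatingByRegion countriesGroup countriesByRating leagues out) := by unfold Spec_formRatingByRegion; infer_instance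

-- ===== CLAIM (what is proved, stated in full; the proofs are below) =====
def Claim_equal_formRatingByRegion : Prop := ∀ (countriesGroup : List (String × List String)) (countriesByRating : List (String × List (String × List String))) (leagues : List (String × List (String × Int))), Dom_formRatingByRegion countriesGroup countriesByRating leagues → Pre_formRatingByRegion countriesGroup countriesByRating leagues → Spec_formRatingByRegion countriesGroup countriesByRating leagues (formRatingByRegion countriesGroup countriesByRating leagues)

-- ===== LEMMAS AND PROOFS =====

-- Abbreviations for the two loop bodies (definitionally equal to the ports' loops).
def pvLvl (lgD : PySem.Dict String (List (String × Int))) (lg : String) : Int :=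
  (PySem.Dict.ofList (lgD.getD lg [])).getD "level" 0

def pvInnerA (lgD : PySem.Dict String (List (String × Int))) (ratings : PySem.Dict String (List String)) (reg : String) (r : PySem.Dict String (List (List (String × List String)))) : PySem.Dict String (List (List (String × List String))) :=
  ratings.keys.foldl (fun r size =>
    r.modify reg [] (fun v =>
      v ++ [[(PySem.List.pyGetD ratings.keys 0 "",
        (PySem.List.sorted ((ratings.getD size []).foldl (fun lev oneLeague =>
          lev ++ [((PySem.Dict.ofList (lgD.getD oneLeague [])).getD "level" 0, oneLeague)]) []) (fun item => item.1) false).map (fun value => value.2))]])) r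

def pvStepA (cgD : PySem.Dict String (List String)) (cbrD : PySem.Dict String (List (String × List String))) (lgD : PySem.Dict String (List (String × Int))) (r : PySem.Dict String (List (List (String × List String)))) (c : String) : PySem.Dict String (List (List (String × List String))) :=
  cgD.keys.foldl (fun r reg =>
    if !((cgD.getD reg []).contains c) then r
    else pvInnerA lgD (PySem.Dict.ofList (cbrD.getD c [])) reg r) r

def pvRegionsOf (cgD : PySem.Dict String (List String)) : PySem.Dict String (List String) :=
  cgD.items.foldl (fun m p => p.2.foldl (fun m country => m.modify country [] (fun s => PySem.Set.add s p.1)) m) PySem.Dict.empty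

def pvStepB (regionsOf : PySem.Dict String (List String)) (lgD : PySem.Dict String (List (String × Int))) (r : PySem.Dict String (List (List (String × List String)))) (p : String × List (String × List String)) : PySem.Dict String (List (List (String × List String))) :=
  match regionsOf.get? p.1 with
  | none => r
  | some regions =>
    let ratings := PySem.Dict.ofList p.2
    if regions.isEmpty || ratings.items.isEmpty then r
    else
      let firstKey := PySem.List.pyGetD ratings.keys 0 ""
      let blocks := ratings.items.map (fun q =>
        [(firstKey, PySem.List.sorted q.2 (fun lg => (PySem.Dict.ofList (lgD.getD lg [])).getD "level" 0) false)])
      regions.foldl (fun r region => r.modify region [] (fun v => v ++ blocks)) r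

def pvInit (cgD : PySem.Dict String (List String)) : PySem.Dict String (List (List (String × List String))) :=
  cgD.keys.foldl (fun r reg => r.insert reg []) PySem.Dict.empty

def pvPayload (lgD : PySem.Dict String (List (String × Int))) (ratings : PySem.Dict String (List String)) : List (List (String × List String)) :=
  ratings.items.map (fun q =>
    [(PySem.List.pyGetD ratings.keys 0 "", PySem.List.sorted q.2 (fun lg => pvLvl lgD lg) false)])

def pvCond (cgD : PySem.Dict String (List String)) (c k : String) : Bool := (cgD.getD k []).contains c

def pvContrib (cgD : PySem.Dict String (List String)) (lgD : PySem.Dict String (List (String × Int))) (ratings : PySem.Dict String (List String)) (c k : String) : List (List (String × List String)) :=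
  if pvCond cgD c k then pvPayload lgD ratings else []

theorem pvA_eq (cg : List (String × List String)) (cbr : List (String × List (String × List String))) (lg : List (String × List (String × Int))) :
    formRatingByRegion cg cbr lg = ((PySem.Dict.ofList cbr).keys.foldl (pvStepA (PySem.Dict.ofList cg) (PySem.Dict.ofList cbr) (PySem.Dict.ofList lg)) (pvInit (PySem.Dict.ofList cg))).items := rfl

theorem pvB_eq (cg : List (String × List String)) (cbr : List (String × List (String × List String))) (lg : List (String × List (String × Int))) :
    formRatingByRegion_alt cg cbr lg = ((PySem.Dict.ofList cbr).items.foldl (pvStepB (pvRegionsOf (PySem.Dict.ofList cg)) (PySem.Dict.ofList lg)) (pvInit (PySem.Dict.ofList cg))).items := rfl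

-- (S1) stripping the decoration from A's decorate-sort-undecorate gives B's keyed sort
theorem pvInsertBy_dec {α : Type} (k : α → Int) (x : α) (acc : List α) :
    PySem.List.insertBy (fun a b => decide (a.1 < b.1)) ((k x, x)) (acc.map (fun z => ((k z : Int), z)))
      = (PySem.List.insertBy (fun a b => decide (k a < k b)) x acc).map (fun z => ((k z : Int), z)) := by
  induction acc with
  | nil => simp [PySem.List.insertBy]
  | cons y ys ih =>
    simp only [List.map_cons, PySem.List.insertBy]
    by_cases h : k x < k y
    · simp [h]
    · simp [h, ih]

theorem pvSorted_dec {α : Type} (xs : List α) (k : α → Int) :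
    (PySem.List.sorted (xs.map (fun x => ((k x : Int), x))) (fun it => it.1) false).map (fun v => v.2)
      = PySem.List.sorted xs k false := by
  have aux2 : ∀ (l : List α) (acc : List α),
      (l.map (fun x => ((k x : Int), x))).foldl (fun a x => PySem.List.insertBy (fun a b => decide (a.1 < b.1)) x a) (acc.map (fun z => ((k z : Int), z)))
        = (l.foldl (fun a x => PySem.List.insertBy (fun a b => decide (k a < k b)) x a) acc).map (fun z => ((k z : Int), z)) := by
    intro l
    induction l with
    | nil => intro acc; simp
    | cons x xs ih =>
      intro acc
      simp only [List.map_cons, List.foldl_cons]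
      rw [pvInsertBy_dec k x acc]
      exact ih _
  rw [PySem.List.sorted_eq_foldl_insertBy, PySem.List.sorted_eq_foldl_insertBy]
  have := aux2 xs []
  simp only [List.map_nil] at this
  rw [this, List.map_map]
  exact List.map_id _

-- (G0) getD through a loop of appends at one fixed key
theorem pvGetD_fold_append {α β : Type} (l : List α) (g : α → β) (reg : String) (r : PySem.Dict String (List β)) (k : String) :
    ((l.foldl (fun r x => r.modify reg [] (fun v => v ++ [g x])) r).getD k [])
      = r.getD k [] ++ (if k = reg then l.map g else []) := by
  induction l generalizing r with
  | nil => simp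
  | cons x xs ih =>
    simp only [List.foldl_cons, ih, PySem.Dict.getD_modify, List.map_cons]
    by_cases hk : k = reg
    · subst hk; simp
    · simp [hk]

theorem pvKeys_fold_append {α β : Type} (l : List α) (g : α → β) (reg : String) (r : PySem.Dict String (List β)) (h : reg ∈ r.keys) :
    (l.foldl (fun r x => r.modify reg [] (fun v => v ++ [g x])) r).keys = r.keys := by
  induction l generalizing r with
  | nil => rfl
  | cons x xs ih =>
    have hc : r.contains reg = true := (PySem.Dict.contains_iff_mem_keys r reg).mpr h
    have hkeys : (r.modify reg [] (fun v => v ++ [g x])).keys = r.keys := by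
      rw [PySem.Dict.keys_modify, PySem.Dict.keys_insert_of_contains _ _ hc]
    simp only [List.foldl_cons]
    rw [ih _ (by rw [hkeys]; exact h), hkeys]

-- (G1) getD through a loop that appends a per-key payload at each key of a Nodup list
theorem pvGetD_fold_local {β : Type} (regs : List String) (step : PySem.Dict String (List β) → String → PySem.Dict String (List β)) (q : String → List β)
    (hstep : ∀ r reg k, (step r reg).getD k [] = r.getD k [] ++ (if k = reg then q reg else []))
    (hnd : regs.Nodup) (r : PySem.Dict String (List β)) (k : String) :
    ((regs.foldl step r).getD k []) = r.getD k [] ++ (if k ∈ regs then q k else []) := by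
  induction regs generalizing r with
  | nil => simp
  | cons reg0 regs ih =>
    rw [List.nodup_cons] at hnd
    rw [List.foldl_cons, ih hnd.2, hstep]
    by_cases hk : k = reg0
    · subst hk; simp [hnd.1]
    · simp [hk]

theorem pvKeys_fold_local {β : Type} (regs : List String) (step : PySem.Dict String (List β) → String → PySem.Dict String (List β))
    (hstep : ∀ r reg, reg ∈ r.keys → (step r reg).keys = r.keys)
    (r : PySem.Dict String (List β)) (hsub : ∀ reg ∈ regs, reg ∈ r.keys) :
    (regs.foldl step r).keys = r.keys := by
  induction regs generalizing r with
  | nil => rfl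
  | cons reg0 regs ih =>
    have h0 : (step r reg0).keys = r.keys := hstep r reg0 (hsub reg0 (by simp))
    simp only [List.foldl_cons]
    rw [ih _ (by intro reg hreg; rw [h0]; exact hsub reg (by simp [hreg])), h0]

-- cond is false off the keys of cgD
theorem pvCond_false_of_not_mem (cgD : PySem.Dict String (List String)) (c k : String) (h : k ∉ cgD.keys) :
    pvCond cgD c k = false := by
  have hc : cgD.contains k = false := by
    cases hx : cgD.contains k
    · rfl
    · exact absurd ((PySem.Dict.contains_iff_mem_keys cgD k).mp hx) h
  unfold pvCond
  rw [PySem.Dict.getD_of_not_contains _ _ hc]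
  rfl

-- (P) A's per-size block list equals B's payload
theorem pvPayload_eq (lgD : PySem.Dict String (List (String × Int))) (ratings : PySem.Dict String (List String)) (hnd : ratings.keys.Nodup) :
    ratings.keys.map (fun size =>
        [(PySem.List.pyGetD ratings.keys 0 "",
          (PySem.List.sorted ((ratings.getD size []).foldl (fun lev oneLeague =>
              lev ++ [((PySem.Dict.ofList (lgD.getD oneLeague [])).getD "level" 0, oneLeague)]) []) (fun item => item.1) false).map (fun value => value.2))])
      = pvPayload lgD ratings := by
  unfold pvPayload
  rw [PySem.Dict.items_eq_map_keys ratings hnd [], List.map_map]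
  refine List.map_congr_left (fun size _ => ?_)
  rw [PySem.List.foldl_append_singleton_eq_map]
  simp only [List.nil_append, Function.comp]
  rw [pvSorted_dec]
  rfl

theorem pvInnerA_getD (lgD : PySem.Dict String (List (String × Int))) (ratings : PySem.Dict String (List String)) (hnd : ratings.keys.Nodup) (reg : String) (r : PySem.Dict String (List (List (String × List String)))) (k : String) :
    (pvInnerA lgD ratings reg r).getD k [] = r.getD k [] ++ (if k = reg then pvPayload lgD ratings else []) := by
  unfold pvInnerA
  rw [pvGetD_fold_append, pvPayload_eq lgD ratings hnd]

theorem pvInnerA_keys (lgD : PySem.Dict String (List (String × Int))) (ratings : PySem.Dict String (List String)) (reg : String) (r : PySem.Dict String (List (List (String × List String)))) (h : reg ∈ r.keys) :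
    (pvInnerA lgD ratings reg r).keys = r.keys := by
  unfold pvInnerA
  rw [pvKeys_fold_append _ _ _ _ h]

-- (A-getD) effect of A's per-country step on one bucket
theorem pvStepA_getD (cgD : PySem.Dict String (List String)) (hnd : cgD.keys.Nodup) (cbrD : PySem.Dict String (List (String × List String))) (lgD : PySem.Dict String (List (String × Int))) (r : PySem.Dict String (List (List (String × List String)))) (c k : String) :
    (pvStepA cgD cbrD lgD r c).getD k [] = r.getD k [] ++ pvContrib cgD lgD (PySem.Dict.ofList (cbrD.getD c [])) c k := by
  unfold pvStepA
  rw [pvGetD_fold_local cgD.keys _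
      (fun reg => if pvCond cgD c reg then pvPayload lgD (PySem.Dict.ofList (cbrD.getD c [])) else []) ?_ hnd r k]
  · by_cases hk : k ∈ cgD.keys
    · simp only [if_pos hk]
      rfl
    · rw [if_neg hk]
      unfold pvContrib
      rw [pvCond_false_of_not_mem cgD c k hk]
      simp
  · intro r' reg k'
    by_cases hc : (cgD.getD reg []).contains c
    · rw [if_neg (by rw [hc]; decide)]
      rw [pvInnerA_getD lgD _ (PySem.Dict.nodup_keys_ofList _) reg r' k']
      have : pvCond cgD c reg = true := hc
      simp [this]
    · have hcf : (cgD.getD reg []).contains c = false := Bool.eq_false_iff.mpr hc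
      rw [if_pos (by rw [hcf]; decide)]
      have : pvCond cgD c reg = false := hcf
      simp [this]

theorem pvNodupAdd {α : Type} [BEq α] [LawfulBEq α] (s : PySem.Set α) (x : α) (h : s.Nodup) :
    (PySem.Set.add s x).Nodup := by
  simp only [PySem.Set.add]
  split_ifs with h1
  · exact h
  · have hx : x ∉ s := by simpa using h1
    simp only [List.nodup_append, h, true_and]
    refine ⟨List.nodup_singleton x, ?_⟩
    intro a ha b hb
    simp only [List.mem_singleton] at hb
    subst hb
    exact fun hax => hx (by rwa [hax] at ha)

-- (R) regionsOf characterisation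
theorem pvRegionsOf_inner (members : List String) (reg : String) (m : PySem.Dict String (List String)) (c : String) :
    ((members.foldl (fun m c' => m.modify c' [] (fun s => PySem.Set.add s reg)) m).getD c [])
      = if c ∈ members then PySem.Set.add (m.getD c []) reg else m.getD c [] := by
  induction members generalizing m with
  | nil => simp
  | cons c0 cs ih =>
    rw [List.foldl_cons, ih]
    by_cases hc : c = c0
    · subst hc
      rw [PySem.Dict.getD_modify]
      simp only [List.mem_cons, true_or, if_pos]
      by_cases hm : c ∈ cs
      · simp [hm]
      · simp [hm]
    · rw [PySem.Dict.getD_modify_of_ne _ _ _ hc]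
      simp [List.mem_cons, hc]

theorem pvRegionsOf_mem_aux (pairs : List (String × List String)) (m : PySem.Dict String (List String)) (c k : String) :
    (k ∈ (pairs.foldl (fun m p => p.2.foldl (fun m c' => m.modify c' [] (fun s => PySem.Set.add s p.1)) m) m).getD c [])
      ↔ (k ∈ m.getD c [] ∨ ∃ p ∈ pairs, p.1 = k ∧ c ∈ p.2) := by
  induction pairs generalizing m with
  | nil => simp
  | cons p ps ih =>
    rw [List.foldl_cons, ih, pvRegionsOf_inner]
    by_cases hc : c ∈ p.2
    · simp only [if_pos hc, PySem.Set.mem_add, List.mem_cons]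
      constructor
      · rintro ((h | rfl) | h)
        · exact Or.inl h
        · exact Or.inr ⟨p, Or.inl rfl, rfl, hc⟩
        · obtain ⟨q, hq, hqk, hqc⟩ := h
          exact Or.inr ⟨q, Or.inr hq, hqk, hqc⟩
      · rintro (h | ⟨q, (rfl | hq), hqk, hqc⟩)
        · exact Or.inl (Or.inl h)
        · exact Or.inl (Or.inr hqk.symm)
        · exact Or.inr ⟨q, hq, hqk, hqc⟩
    · simp only [if_neg hc, List.mem_cons]
      constructor
      · rintro (h | h)
        · exact Or.inl h
        · obtain ⟨q, hq, hqk, hqc⟩ := h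
          exact Or.inr ⟨q, Or.inr hq, hqk, hqc⟩
      · rintro (h | ⟨q, (rfl | hq), hqk, hqc⟩)
        · exact Or.inl h
        · exact absurd hqc hc
        · exact Or.inr ⟨q, hq, hqk, hqc⟩

theorem pvRegionsOf_nodup_aux (pairs : List (String × List String)) (m : PySem.Dict String (List String))
    (h : ∀ c, (m.getD c []).Nodup) (c : String) :
    ((pairs.foldl (fun m p => p.2.foldl (fun m c' => m.modify c' [] (fun s => PySem.Set.add s p.1)) m) m).getD c []).Nodup := by
  induction pairs generalizing m with
  | nil => exact h c
  | cons p ps ih =>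
    rw [List.foldl_cons]
    refine ih _ (fun c' => ?_)
    rw [pvRegionsOf_inner]
    split_ifs with hc
    · exact pvNodupAdd _ _ (h c')
    · exact h c'

theorem pvRegionsOf_mem (cgD : PySem.Dict String (List String)) (hnd : cgD.keys.Nodup) (c k : String) :
    k ∈ (pvRegionsOf cgD).getD c [] ↔ pvCond cgD c k = true := by
  unfold pvRegionsOf
  rw [pvRegionsOf_mem_aux]
  simp only [PySem.Dict.getD_empty, List.not_mem_nil, false_or]
  constructor
  · rintro ⟨p, hp, rfl, hc⟩
    unfold pvCond
    rw [PySem.Dict.getD_of_mem_items cgD (by simpa using hp) hnd []]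
    exact List.elem_eq_true_of_mem hc
  · intro hcond
    unfold pvCond at hcond
    cases hx : cgD.get? k with
    | none =>
      rw [PySem.Dict.getD_of_get?_eq_none _ _ hx] at hcond
      simp at hcond
    | some v =>
      rw [PySem.Dict.getD_of_get?_eq_some _ _ hx] at hcond
      exact ⟨(k, v), (PySem.Dict.get?_eq_some_iff_mem_items cgD k v hnd).mp hx, rfl, by simpa using hcond⟩

theorem pvRegionsOf_nodup (cgD : PySem.Dict String (List String)) (c : String) : ((pvRegionsOf cgD).getD c []).Nodup := by
  unfold pvRegionsOf
  exact pvRegionsOf_nodup_aux _ _ (fun c' => by rw [PySem.Dict.getD_empty]; exact List.nodup_nil) c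

-- (B-getD) effect of B's per-country step on one bucket
theorem pvStepB_getD (cgD : PySem.Dict String (List String)) (hnd : cgD.keys.Nodup) (lgD : PySem.Dict String (List (String × Int))) (r : PySem.Dict String (List (List (String × List String)))) (p : String × List (String × List String)) (k : String) :
    (pvStepB (pvRegionsOf cgD) lgD r p).getD k [] = r.getD k [] ++ pvContrib cgD lgD (PySem.Dict.ofList p.2) p.1 k := by
  cases hx : (pvRegionsOf cgD).get? p.1 with
  | none =>
    have hnone : (pvRegionsOf cgD).getD p.1 [] = [] := PySem.Dict.getD_of_get?_eq_none _ _ hx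
    have hcond : pvCond cgD p.1 k = false := by
      cases hck : pvCond cgD p.1 k
      · rfl
      · have := (pvRegionsOf_mem cgD hnd p.1 k).mpr hck
        rw [hnone] at this
        exact absurd this (List.not_mem_nil)
    simp only [pvStepB, hx]
    unfold pvContrib
    rw [hcond]
    simp
  | some regions =>
    have hregs : (pvRegionsOf cgD).getD p.1 [] = regions := PySem.Dict.getD_of_get?_eq_some _ _ hx
    have hmem : ∀ k', k' ∈ regions ↔ pvCond cgD p.1 k' = true := by
      intro k'
      rw [← hregs]
      exact pvRegionsOf_mem cgD hnd p.1 k'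
    simp only [pvStepB, hx]
    by_cases hre : (regions.isEmpty || (PySem.Dict.ofList p.2).items.isEmpty) = true
    · rw [if_pos hre]
      have hcontrib : pvContrib cgD lgD (PySem.Dict.ofList p.2) p.1 k = [] := by
        rcases (Bool.or_eq_true _ _).mp hre with hr | hi
        · have hcond : pvCond cgD p.1 k = false := by
            cases hck : pvCond cgD p.1 k
            · rfl
            · have := (hmem k).mpr hck
              rw [List.isEmpty_iff.mp hr] at this
              exact absurd this (List.not_mem_nil)
          unfold pvContrib
          rw [hcond]
          rfl
        · unfold pvContrib pvPayload
          rw [List.isEmpty_iff.mp hi]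
          simp
      rw [hcontrib, List.append_nil]
    · rw [if_neg hre]
      rw [pvGetD_fold_local regions _
          (fun _ => (PySem.Dict.ofList p.2).items.map (fun q =>
            [(PySem.List.pyGetD (PySem.Dict.ofList p.2).keys 0 "",
              PySem.List.sorted q.2 (fun lg => (PySem.Dict.ofList (lgD.getD lg [])).getD "level" 0) false)]))
          (fun r' reg' k' => by
            rw [PySem.Dict.getD_modify]
            split_ifs with hkk
            · subst hkk; rfl
            · simp)
          (hregs ▸ pvRegionsOf_nodup cgD p.1) r k]
      unfold pvContrib
      by_cases hk : k ∈ regions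
      · rw [if_pos hk, if_pos ((hmem k).mp hk)]
        rfl
      · rw [if_neg hk]
        have hcond : pvCond cgD p.1 k = false := by
          cases hck : pvCond cgD p.1 k
          · rfl
          · exact absurd ((hmem k).mpr hck) hk
        rw [hcond]
        rfl

-- keys preservation
theorem pvStepA_keys (cgD : PySem.Dict String (List String)) (cbrD : PySem.Dict String (List (String × List String))) (lgD : PySem.Dict String (List (String × Int))) (r : PySem.Dict String (List (List (String × List String)))) (c : String) (h : r.keys = cgD.keys) :
    (pvStepA cgD cbrD lgD r c).keys = cgD.keys := by
  unfold pvStepA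
  rw [pvKeys_fold_local cgD.keys _
      (fun r' reg hreg => by
        by_cases hc : (cgD.getD reg []).contains c
        · rw [if_neg (by rw [hc]; decide)]
          exact pvInnerA_keys _ _ _ _ hreg
        · rw [if_pos (by rw [Bool.eq_false_iff.mpr hc]; decide)])
      r (fun reg hreg => by rw [h]; exact hreg), h]

theorem pvStepB_keys (cgD : PySem.Dict String (List String)) (hnd : cgD.keys.Nodup) (lgD : PySem.Dict String (List (String × Int))) (r : PySem.Dict String (List (List (String × List String)))) (p : String × List (String × List String)) (h : r.keys = cgD.keys) :
    (pvStepB (pvRegionsOf cgD) lgD r p).keys = cgD.keys := by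
  cases hx : (pvRegionsOf cgD).get? p.1 with
  | none => simp only [pvStepB, hx]; exact h
  | some regions =>
    have hregs : (pvRegionsOf cgD).getD p.1 [] = regions := PySem.Dict.getD_of_get?_eq_some _ _ hx
    simp only [pvStepB, hx]
    by_cases hre : (regions.isEmpty || (PySem.Dict.ofList p.2).items.isEmpty) = true
    · rw [if_pos hre]; exact h
    · rw [if_neg hre]
      rw [pvKeys_fold_local regions _
          (fun r' reg hreg => by
            rw [PySem.Dict.keys_modify,
              PySem.Dict.keys_insert_of_contains _ _ ((PySem.Dict.contains_iff_mem_keys r' reg).mpr hreg)])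
          r (fun reg hreg => ?_), h]
      rw [h]
      by_contra hk
      have : pvCond cgD p.1 reg = false := pvCond_false_of_not_mem cgD p.1 reg hk
      have hmem := (pvRegionsOf_mem cgD hnd p.1 reg).mp (hregs ▸ hreg)
      rw [this] at hmem
      exact Bool.false_ne_true hmem

-- main relational fold
theorem pvMain (cgD : PySem.Dict String (List String)) (hnd : cgD.keys.Nodup) (cbrD : PySem.Dict String (List (String × List String))) (lgD : PySem.Dict String (List (String × Int)))
    (cs : List String) (rA rB : PySem.Dict String (List (List (String × List String))))
    (hg : ∀ k, rA.getD k [] = rB.getD k []) (hA : rA.keys = cgD.keys) (hB : rB.keys = cgD.keys) :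
    (∀ k, (cs.foldl (pvStepA cgD cbrD lgD) rA).getD k [] = (cs.foldl (fun r c => pvStepB (pvRegionsOf cgD) lgD r (c, cbrD.getD c [])) rB).getD k [])
    ∧ (cs.foldl (pvStepA cgD cbrD lgD) rA).keys = cgD.keys
    ∧ (cs.foldl (fun r c => pvStepB (pvRegionsOf cgD) lgD r (c, cbrD.getD c [])) rB).keys = cgD.keys := by
  induction cs generalizing rA rB with
  | nil => exact ⟨hg, hA, hB⟩
  | cons c cs ih =>
    simp only [List.foldl_cons]
    refine ih _ _ (fun k => ?_) (pvStepA_keys cgD cbrD lgD rA c hA) (pvStepB_keys cgD hnd lgD rB _ hB)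
    rw [pvStepA_getD cgD hnd cbrD lgD rA c k, pvStepB_getD cgD hnd lgD rB (c, cbrD.getD c []) k, hg k]

theorem pvInit_keys (cgD : PySem.Dict String (List String)) (hnd : cgD.keys.Nodup) : (pvInit cgD).keys = cgD.keys := by
  have h := PySem.Dict.keys_foldl_insert (ν := List (List (String × List String))) cgD.keys (fun _ _ => []) PySem.Dict.empty
  calc (pvInit cgD).keys = PySem.Set.ofList cgD.keys := by
        unfold pvInit
        rw [h]
        rfl
    _ = cgD.keys := PySem.Set.ofList_eq_self_of_nodup _ hnd

-- ===== VERDICT (by name: the statement is the Claim_ definition above) =====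
theorem formRatingByRegion_spec : Claim_equal_formRatingByRegion := by
  intro cg cbr lg _ _
  unfold Spec_formRatingByRegion
  have hnd := PySem.Dict.nodup_keys_ofList cg
  have hndb := PySem.Dict.nodup_keys_ofList cbr
  rw [pvA_eq, pvB_eq, PySem.Dict.items_eq_map_keys (PySem.Dict.ofList cbr) hndb [], List.foldl_map]
  obtain ⟨hg, hA, hB⟩ := pvMain (PySem.Dict.ofList cg) hnd (PySem.Dict.ofList cbr) (PySem.Dict.ofList lg)
    (PySem.Dict.ofList cbr).keys (pvInit _) (pvInit _) (fun k => rfl)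
    (pvInit_keys _ hnd) (pvInit_keys _ hnd)
  rw [PySem.Dict.items_eq_map_keys _ (by rw [hA]; exact hnd) [],
      PySem.Dict.items_eq_map_keys _ (by rw [hB]; exact hnd) [], hA, hB]
  exact List.map_congr_left (fun k _ => by rw [hg k])
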